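-- pv_equiv track=rewrite | github.com/HadrielWonda/f1-calendar | f1-calendar.py | checkSummerShutdown
-- ===== SOURCE A (Python) =====
-- def checkSummerShutdown(weekends):
--     consecutive_no_race_weekends = 0
--
--     # Iterate through the weekends
--     for week in weekends:
--         if week in [26, 27, 29, 30, 34]:  # since 26, 27, 29, 30, 34 are the weeks in July and August
--             # If there is no race, increment the consecutive count
--             consecutive_no_race_weekends += 1
--         else:
--             # If there is a race, reset the consecutive count
--             consecutive_no_race_weekends = 0
--
--         # Check if there are three successive weekends without a race
--         if consecutive_no_race_weekends == 3:
--             return True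
--
--     return False
-- ===== SOURCE B (Python) =====
-- def checkSummerShutdown(weekends):
--     # Sliding window of width 3 instead of a running counter: check each
--     # window of three adjacent weekends for being all summer-shutdown weeks.
--     summer = [26, 27, 29, 30, 34]
--     for i in range(len(weekends) - 2):
--         if weekends[i] in summer and weekends[i + 1] in summer and weekends[i + 2] in summer:
--             return True
--     return False
-- ===== Notes on version B (the rewrite author's own statement) =====
-- stated objective: alternative
-- what changed: Replaced the running consecutive counter with a sliding 3-element window: B checks each window of three adjacent weekends for being all summer weeks, keeping no counter state.
import Mathlib
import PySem

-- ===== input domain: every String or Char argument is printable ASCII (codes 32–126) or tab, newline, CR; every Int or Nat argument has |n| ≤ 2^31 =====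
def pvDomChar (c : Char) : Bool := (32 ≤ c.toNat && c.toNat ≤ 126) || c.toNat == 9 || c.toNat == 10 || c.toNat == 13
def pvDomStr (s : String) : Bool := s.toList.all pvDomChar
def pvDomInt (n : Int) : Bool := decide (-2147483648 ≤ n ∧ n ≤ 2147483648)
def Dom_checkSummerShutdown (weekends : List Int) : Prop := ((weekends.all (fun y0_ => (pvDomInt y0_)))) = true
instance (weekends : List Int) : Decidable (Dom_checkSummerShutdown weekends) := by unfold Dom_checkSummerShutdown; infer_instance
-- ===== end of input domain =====

-- B replaces A's running consecutive-weeks counter by a sliding 3-element window (alternative decomposition, same cost).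


-- ===== PORT A =====
-- A's loop: a running count of consecutive summer weekends, early return when it reaches 3.
def checkSummerShutdown_go : List Int → Int → Bool
  | [], _ => false
  | week :: rest, consecutive =>
    let consecutive' : Int :=
      if ([26, 27, 29, 30, 34] : List Int).contains week then consecutive + 1 else 0
    if consecutive' = 3 then true else checkSummerShutdown_go rest consecutive'

def checkSummerShutdown (weekends : List Int) : Bool :=
  checkSummerShutdown_go weekends 0

-- ===== PORT B =====
-- B's loop: slide a window of width 3; return True on the first all-summer window.
def checkSummerShutdown_alt : List Int → Bool
  | a :: b :: c :: r =>
    if ([26, 27, 29, 30, 34] : List Int).contains a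
        && ([26, 27, 29, 30, 34] : List Int).contains b
        && ([26, 27, 29, 30, 34] : List Int).contains c then true
    else checkSummerShutdown_alt (b :: c :: r)
  | _ => false

-- ===== PRECONDITION & SPEC =====
def Spec_checkSummerShutdown (weekends : List Int) (out : Bool) : Prop := out = checkSummerShutdown_alt weekends
instance (weekends : List Int) (out : Bool) : Decidable (Spec_checkSummerShutdown weekends out) := by unfold Spec_checkSummerShutdown; infer_instance

-- ===== CLAIM (what is proved, stated in full; the proofs are below) =====
def Claim_equal_checkSummerShutdown : Prop := ∀ (weekends : List Int), Dom_checkSummerShutdown weekends → Spec_checkSummerShutdown weekends (checkSummerShutdown weekends)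

-- ===== LEMMAS AND PROOFS =====

-- Shadow definitions with a named membership test, so simp can treat it as opaque.
def pvSummer (w : Int) : Bool := ([26, 27, 29, 30, 34] : List Int).contains w

def pvGo : List Int → Int → Bool
  | [], _ => false
  | week :: rest, consecutive =>
    let consecutive' : Int := if pvSummer week then consecutive + 1 else 0
    if consecutive' = 3 then true else pvGo rest consecutive'

def pvAlt : List Int → Bool
  | a :: b :: c :: r =>
    if pvSummer a && pvSummer b && pvSummer c then true else pvAlt (b :: c :: r)
  | _ => false

-- "the first k elements exist and are all summer weeks"
def pvTakeOK : Nat → List Int → Bool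
  | 0, _ => true
  | _ + 1, [] => false
  | k + 1, w :: t => pvSummer w && pvTakeOK k t

theorem pvGo_eq (ws : List Int) : ∀ c : Int, checkSummerShutdown_go ws c = pvGo ws c := by
  induction ws with
  | nil => intro c; rfl
  | cons w t ih =>
    intro c
    simp only [checkSummerShutdown_go, pvGo, pvSummer]
    split_ifs <;> simp [ih]

theorem pvAlt_eq : ∀ ws : List Int, checkSummerShutdown_alt ws = pvAlt ws
  | [] => rfl
  | [_] => rfl
  | [_, _] => rfl
  | a :: b :: c :: r => by
    simp only [checkSummerShutdown_alt, pvAlt, pvSummer]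
    rw [pvAlt_eq (b :: c :: r)]
    rfl


theorem pvTakeOK_absorb (ws : List Int) (h : pvTakeOK 3 ws = true) : pvAlt ws = true := by
  match ws with
  | [] => simp [pvTakeOK] at h
  | [a] => simp [pvTakeOK] at h
  | [a, b] => simp [pvTakeOK] at h
  | a :: b :: c :: r =>
    simp [pvTakeOK] at h
    simp [pvAlt, h.1, h.2.1, h.2.2]

theorem pvGo_spec (ws : List Int) :
    ∀ k : Nat, k ≤ 2 → pvGo ws (k : Int) = (pvTakeOK (3 - k) ws || pvAlt ws) := by
  induction ws with
  | nil =>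
    intro k hk
    interval_cases k <;> simp [pvGo, pvTakeOK, pvAlt]
  | cons w t ih =>
    intro k hk
    cases hs : pvSummer w with
    | false =>
      have h0 : pvGo t (0 : Int) = (pvTakeOK 3 t || pvAlt t) := by simpa using ih 0 (by norm_num)
      have hhead : pvTakeOK (3 - k) (w :: t) = false := by
        interval_cases k <;> simp [pvTakeOK, hs]
      rw [hhead]
      have hgo : pvGo (w :: t) (k : Int) = pvGo t 0 := by simp [pvGo, hs]
      rw [hgo, h0]
      match t with
      | [] => simp [pvTakeOK, pvAlt]
      | [b] => simp [pvTakeOK, pvAlt]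
      | b :: c :: r =>
        by_cases h3 : pvTakeOK 3 (b :: c :: r) = true
        · simp [h3, pvTakeOK_absorb _ h3, pvAlt, hs]
        · simp only [Bool.not_eq_true] at h3
          simp [h3, pvAlt, hs]
    | true =>
      interval_cases k
      · -- k = 0
        have h1 : pvGo t (1 : Int) = (pvTakeOK 2 t || pvAlt t) := by simpa using ih 1 (by norm_num)
        have hgo : pvGo (w :: t) (0 : Int) = pvGo t 1 := by simp [pvGo, hs]
        push_cast
        rw [hgo, h1]
        match t with
        | [] => simp [pvTakeOK, pvAlt, hs]
        | [b] => simp [pvTakeOK, pvAlt, hs]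
        | b :: c :: r =>
          cases hb : pvSummer b <;> cases hc : pvSummer c <;>
            simp [pvTakeOK, pvAlt, hs, hb, hc]
      · -- k = 1
        have h2 : pvGo t (2 : Int) = (pvTakeOK 1 t || pvAlt t) := by simpa using ih 2 (by norm_num)
        have hgo : pvGo (w :: t) (1 : Int) = pvGo t 2 := by simp [pvGo, hs]
        push_cast
        rw [hgo, h2]
        match t with
        | [] => simp [pvTakeOK, pvAlt, hs]
        | [b] => simp [pvTakeOK, pvAlt, hs]
        | b :: c :: r =>
          cases hb : pvSummer b <;> cases hc : pvSummer c <;>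
            simp [pvTakeOK, pvAlt, hs, hb, hc]
      · -- k = 2 : counter reaches 3, early return True; the head alone makes pvTakeOK 1 true
        simp [pvGo, pvTakeOK, hs]

-- ===== VERDICT (by name: the statement is the Claim_ definition above) =====
theorem checkSummerShutdown_spec : Claim_equal_checkSummerShutdown := by
  intro ws _
  unfold Spec_checkSummerShutdown checkSummerShutdown
  rw [pvGo_eq, pvAlt_eq]
  have h := pvGo_spec ws 0 (by norm_num)
  simp only [Nat.cast_zero] at h
  rw [h]
  by_cases h3 : pvTakeOK 3 ws = true
  · simp [h3, pvTakeOK_absorb _ h3]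
  · simp only [Bool.not_eq_true] at h3
    simp [h3]
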